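-- pv_equiv track=rewrite | github.com/imadhaka/PyLeetProblems | dsa/MaxSumPair.py | getSumPair
-- ===== SOURCE A (Python) =====
-- def getSumPair(arr):
--     a = arr[0]
--     b = arr[1]
--     for i in range(len(arr)):
--         for j in range(i+1, len(arr)):
--             if arr[i] + arr[j] > a+b:
--                 a = arr[i]
--                 b = arr[j]
--     return a, b
-- ===== SOURCE B (Python) =====
-- def getSumPair(arr):
--     n = len(arr)
--     # suf[i] = max(arr[i+1:]) for i in 0..n-2, built right to left
--     suf = [arr[n - 1]]
--     for k in range(n - 2, 0, -1):
--         suf.append(arr[k] if arr[k] > suf[-1] else suf[-1])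
--     suf.reverse()
--     best = (arr[0], suf[0])
--     for i in range(1, n - 1):
--         if arr[i] + suf[i] > best[0] + best[1]:
--             best = (arr[i], suf[i])
--     return best
-- ===== Notes on version B (the rewrite author's own statement) =====
-- stated objective: faster
-- what changed: Replaces the O(n^2) double loop over all index pairs by a right-to-left suffix-maximum array plus one left-to-right pass picking the first index whose value plus its suffix maximum is strictly largest.
import Mathlib
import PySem

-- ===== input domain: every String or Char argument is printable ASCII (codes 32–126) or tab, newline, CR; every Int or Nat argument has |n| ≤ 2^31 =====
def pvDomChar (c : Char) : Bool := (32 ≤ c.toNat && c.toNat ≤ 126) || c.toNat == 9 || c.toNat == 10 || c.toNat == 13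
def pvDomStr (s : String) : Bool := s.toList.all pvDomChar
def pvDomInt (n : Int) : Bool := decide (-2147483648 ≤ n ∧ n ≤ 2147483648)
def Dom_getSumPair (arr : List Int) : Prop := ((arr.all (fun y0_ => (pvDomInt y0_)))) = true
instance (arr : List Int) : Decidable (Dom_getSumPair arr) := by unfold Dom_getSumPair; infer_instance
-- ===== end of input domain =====

-- B replaces A's O(n^2) scan over all index pairs by a suffix-maximum array and one linear pass
-- (same value, including A's first-pair-in-scan-order tie-breaking).

-- ===== PORT A =====
-- Literal port of A's double loop; arr[i]/arr[j] are read with pyGetD (range produces only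
-- in-bounds nonnegative indices here, so the default 0 is never the value used).
def getSumPair (arr : List Int) : List Int :=
  match PySem.List.pyGet? arr 0, PySem.List.pyGet? arr 1 with
  | some a0, some b0 =>
      let st := (PySem.List.pyRange 0 (arr.length : Int) 1).foldl
        (fun (st : Int × Int) i =>
          (PySem.List.pyRange (i + 1) (arr.length : Int) 1).foldl
            (fun (st : Int × Int) j =>
              if PySem.List.pyGetD arr i 0 + PySem.List.pyGetD arr j 0 > st.1 + st.2 then
                (PySem.List.pyGetD arr i 0, PySem.List.pyGetD arr j 0)
              else st)
            st)
        (a0, b0)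
      [st.1, st.2]
  | _, _ => []      -- len(arr) < 2: Python raises IndexError (excluded by Pre_)

-- ===== PORT B =====
-- Source B's suf array built right to left: (sufMaxRec xs)[i] = max(xs[i:]).
def sufMaxRec : List Int → List Int
  | [] => []
  | [x] => [x]
  | x :: rest =>
      match sufMaxRec rest with
      | [] => [x]
      | m :: ms => (if x > m then x else m) :: m :: ms

def getSumPair_alt (arr : List Int) : List Int :=
  match arr with
  | [] => []            -- Source B raises IndexError on [] (outside Pre_)
  | [a0] => [a0, a0]    -- Source B: suf = [arr[0]], best = (arr[0], suf[0]), empty loop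
  | a0 :: b0 :: t =>
      let suf := sufMaxRec (b0 :: t)        -- suf[i] = max(arr[i+1:])
      let best := (List.zip (b0 :: t) suf.tail).foldl
        (fun (best : Int × Int) c => if c.1 + c.2 > best.1 + best.2 then c else best)
        (a0, suf.headD 0)
      [best.1, best.2]

-- ===== PRECONDITION & SPEC =====
-- Pre_ excludes exactly the inputs with fewer than two elements, on which A raises IndexError.
def Pre_getSumPair (arr : List Int) : Prop := 2 ≤ arr.length
instance (arr : List Int) : Decidable (Pre_getSumPair arr) := by unfold Pre_getSumPair; infer_instance

def pvWitness_getSumPair : List Int := [1, 2]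

def Spec_getSumPair (arr : List Int) (out : List Int) : Prop := out = getSumPair_alt arr
instance (arr : List Int) (out : List Int) : Decidable (Spec_getSumPair arr out) := by unfold Spec_getSumPair; infer_instance

-- ===== CLAIM (what is proved, stated in full; the proofs are below) =====
def Claim_equal_getSumPair : Prop := ∀ (arr : List Int), Dom_getSumPair arr → Pre_getSumPair arr → Spec_getSumPair arr (getSumPair arr)

-- ===== LEMMAS AND PROOFS =====

-- running maximum: runMax x t = max(x :: t)
def runMax (x : Int) (t : List Int) : Int := t.foldl max x

-- A's state update for one outer iteration, written structurally
def stepA (v : Int) (t : List Int) (st : Int × Int) : Int × Int :=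
  match t with
  | [] => st
  | x :: u => if v + runMax x u > st.1 + st.2 then (v, runMax x u) else st

-- A's outer loop as structural recursion over the suffix
def outerA : List Int → Int × Int → Int × Int
  | [], st => st
  | v :: t, st => outerA t (stepA v t st)

theorem foldl_max_max (l : List Int) : ∀ (a b : Int), l.foldl max (max a b) = max a (l.foldl max b) := by
  induction l with
  | nil => intro a b; rfl
  | cons y t ih =>
      intro a b
      simp only [List.foldl_cons]
      rw [max_assoc, ih]

theorem runMax_cons (x y : Int) (u : List Int) : runMax x (y :: u) = max x (runMax y u) := by
  simp only [runMax, List.foldl_cons]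
  exact foldl_max_max u x y

theorem le_runMax (x : Int) (t : List Int) : x ≤ runMax x t :=
  (PySem.List.le_foldl_max t x).1

theorem sufMaxRec_cons (x : Int) (t : List Int) :
    sufMaxRec (x :: t) = runMax x t :: sufMaxRec t := by
  induction t generalizing x with
  | nil => rfl
  | cons y u ih =>
      rw [show sufMaxRec (x :: y :: u) =
            (match sufMaxRec (y :: u) with
             | [] => [x]
             | m :: ms => (if x > m then x else m) :: m :: ms) from rfl]
      rw [ih y, runMax_cons]
      show ((if x > runMax y u then x else runMax y u) :: runMax y u :: sufMaxRec u)
        = max x (runMax y u) :: runMax y u :: sufMaxRec u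
      by_cases h : runMax y u < x
      · rw [if_pos h, max_eq_left (le_of_lt h)]
      · rw [if_neg (by omega), max_eq_right (by omega)]

-- inner loop: scanning the suffix replaces the state by (v, max suffix) iff it strictly improves
theorem inner_char (v : Int) (x : Int) (t : List Int) :
    ∀ a b : Int,
      (x :: t).foldl (fun st y => if v + y > st.1 + st.2 then (v, y) else st) (a, b)
        = if v + runMax x t > a + b then (v, runMax x t) else (a, b) := by
  induction t generalizing x with
  | nil => intro a b; simp [runMax]
  | cons y u ih =>
      intro a b
      have hstep : (x :: y :: u).foldl (fun st y => if v + y > st.1 + st.2 then (v, y) else st) (a, b)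
          = (y :: u).foldl (fun st y => if v + y > st.1 + st.2 then (v, y) else st)
              (if v + x > a + b then (v, x) else (a, b)) := rfl
      rw [hstep, runMax_cons]
      rcases le_total (runMax y u) x with hr | hr
      · rw [max_eq_left hr]
        by_cases h1 : v + x > a + b
        · rw [if_pos h1, ih y, if_neg (by omega)]
        · rw [if_neg h1, ih y, if_neg (by omega)]
      · rw [max_eq_right hr]
        by_cases h1 : v + x > a + b
        · rw [if_pos h1, ih y]
          by_cases h2 : v + runMax y u > v + x
          · rw [if_pos h2, if_pos (by omega)]
          · have hx : runMax y u = x := by omega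
            rw [if_neg h2, hx, if_pos h1]
        · rw [if_neg h1, ih y]

-- A's index-driven outer loop equals the structural recursion outerA on the suffix arr[k:]
theorem outer_eq (arr : List Int) :
    ∀ (k : Nat) (st : Int × Int),
      (PySem.List.pyRange (k : Int) (arr.length : Int) 1).foldl
        (fun (st : Int × Int) i =>
          (PySem.List.pyRange (i + 1) (arr.length : Int) 1).foldl
            (fun (st : Int × Int) j =>
              if PySem.List.pyGetD arr i 0 + PySem.List.pyGetD arr j 0 > st.1 + st.2 then
                (PySem.List.pyGetD arr i 0, PySem.List.pyGetD arr j 0)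
              else st)
            st)
        st
      = outerA (arr.drop k) st := by
  intro k st
  induction hn : arr.length - k generalizing k st with
  | zero =>
      have hk : arr.length ≤ k := by omega
      rw [PySem.List.pyRange_one_eq_nil (by exact_mod_cast hk), List.drop_eq_nil_of_le hk]
      rfl
  | succ n ihn =>
      have hk : k < arr.length := by omega
      rw [PySem.List.pyRange_one_cons (by exact_mod_cast hk), List.foldl_cons]
      have hinner :
          (PySem.List.pyRange ((k : Int) + 1) (arr.length : Int) 1).foldl
            (fun (st : Int × Int) j =>
              if PySem.List.pyGetD arr (k : Int) 0 + PySem.List.pyGetD arr j 0 > st.1 + st.2 then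
                (PySem.List.pyGetD arr (k : Int) 0, PySem.List.pyGetD arr j 0)
              else st) st
          = (arr.drop (k + 1)).foldl
              (fun (st : Int × Int) y =>
                if PySem.List.pyGetD arr (k : Int) 0 + y > st.1 + st.2 then
                  (PySem.List.pyGetD arr (k : Int) 0, y) else st) st := by
        have := PySem.List.foldl_pyRange_pyGetD' (xs := arr) (d := 0)
          (f := fun (st : Int × Int) y =>
            if PySem.List.pyGetD arr (k : Int) 0 + y > st.1 + st.2 then
              (PySem.List.pyGetD arr (k : Int) 0, y) else st)
          (init := st) (a := (k : Int) + 1) (by omega)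
        simpa using this
      rw [hinner]
      have hdrop : arr.drop k = arr[k] :: arr.drop (k + 1) := List.drop_eq_getElem_cons hk
      have hget : PySem.List.pyGetD arr (k : Int) 0 = arr[k] := by
        simp [PySem.List.pyGetD_natCast, List.getD, hk]
      rw [hdrop]
      show _ = outerA (arr.drop (k+1)) (stepA arr[k] (arr.drop (k+1)) st)
      rcases hd : arr.drop (k+1) with _ | ⟨x, u⟩
      · simp only [List.foldl_nil, stepA]
        have := ihn (k+1) st (by omega)
        rw [hd] at this
        simpa [Nat.cast_add] using this
      · rcases st with ⟨a, b⟩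
        rw [hget, inner_char]
        have := ihn (k+1) (if arr[k] + runMax x u > a + b then (arr[k], runMax x u) else (a, b)) (by omega)
        rw [hd] at this
        simp only [stepA]
        rw [← this]
        norm_num

-- outerA is the pick-first-strict-max fold over the candidates (xs[i], max xs[i+1:])
theorem outerA_eq_zip (xs : List Int) :
    ∀ st : Int × Int,
      outerA xs st
        = (List.zip xs (sufMaxRec xs.tail)).foldl
            (fun (best : Int × Int) c => if c.1 + c.2 > best.1 + best.2 then c else best) st := by
  induction xs with
  | nil => intro st; rfl
  | cons v t ih =>
      intro st
      cases t with
      | nil => rfl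
      | cons x u =>
          show outerA (x :: u) (stepA v (x :: u) st) = _
          rw [ih]
          simp only [List.tail_cons, sufMaxRec_cons, List.zip_cons_cons, List.foldl_cons]
          rfl

-- ===== VERDICT (by name: the statement is the Claim_ definition above) =====
theorem getSumPair_spec : Claim_equal_getSumPair := by
  intro arr _ hpre
  unfold Spec_getSumPair
  match arr, hpre with
  | a0 :: b0 :: t, _ =>
      have hA : getSumPair (a0 :: b0 :: t)
          = [(outerA (a0 :: b0 :: t) (a0, b0)).1, (outerA (a0 :: b0 :: t) (a0, b0)).2] := by
        have h0 := outer_eq (a0 :: b0 :: t) 0 (a0, b0)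
        simp only [List.drop_zero, Nat.cast_zero] at h0
        have hg0 : PySem.List.pyGet? (a0 :: b0 :: t) 0 = some a0 :=
          PySem.List.pyGet?_zero_cons a0 (b0 :: t)
        have hg1 : PySem.List.pyGet? (a0 :: b0 :: t) 1 = some b0 := by
          simp [PySem.List.pyGet?, PySem.List.pyIdx?]
        unfold getSumPair
        simp only [hg0, hg1]
        exact congrArg (fun st : Int × Int => [st.1, st.2]) h0
      rw [hA]
      -- first outer step turns (a0, b0) into the first candidate (a0, max(arr[1:]))
      have hfirst : outerA (a0 :: b0 :: t) (a0, b0) = outerA (b0 :: t) (a0, runMax b0 t) := by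
        show outerA (b0 :: t) (stepA a0 (b0 :: t) (a0, b0)) = _
        have hb : b0 ≤ runMax b0 t := le_runMax b0 t
        simp only [stepA]
        by_cases h : b0 < runMax b0 t
        · rw [if_pos (by omega)]
        · have : runMax b0 t = b0 := by omega
          rw [this, if_neg (by omega)]
      rw [hfirst, outerA_eq_zip]
      show _ = getSumPair_alt (a0 :: b0 :: t)
      rw [show getSumPair_alt (a0 :: b0 :: t)
            = (let suf := sufMaxRec (b0 :: t)
               let best := (List.zip (b0 :: t) suf.tail).foldl
                  (fun (best : Int × Int) c => if c.1 + c.2 > best.1 + best.2 then c else best)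
                  (a0, suf.headD 0)
               [best.1, best.2]) from rfl]
      simp only [sufMaxRec_cons, List.headD_cons, List.tail_cons]
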